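-- pv_equiv track=rewrite | github.com/shauryaCodesAndHosts/all_code | rough/delete2.py | minimum_distracted_soldiers
-- ===== SOURCE A (Python) =====
-- def minimum_distracted_soldiers(A):
--     distracted_soldiers = 0
--     seen_soldiers = 0
--
--     for soldier in A:
--         if soldier == 1:
--             seen_soldiers += 1
--             distracted_soldiers = 0
--         else:
--             distracted_soldiers += 1
--
--     return distracted_soldiers
-- ===== SOURCE B (Python) =====
-- def minimum_distracted_soldiers(A):
--     n = len(A)
--     for i in range(n - 1, -1, -1):
--         if A[i] == 1:
--             return n - 1 - i
--     return n
-- ===== Notes on version B (the rewrite author's own statement) =====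
-- stated objective: idiomatic
-- what changed: Replaces the forward scan with a resetting counter by a reverse scan that finds the last element equal to 1 and returns len(A)-1-i (or len(A) if none), so the answer is computed from the last-match position.
import Mathlib
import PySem

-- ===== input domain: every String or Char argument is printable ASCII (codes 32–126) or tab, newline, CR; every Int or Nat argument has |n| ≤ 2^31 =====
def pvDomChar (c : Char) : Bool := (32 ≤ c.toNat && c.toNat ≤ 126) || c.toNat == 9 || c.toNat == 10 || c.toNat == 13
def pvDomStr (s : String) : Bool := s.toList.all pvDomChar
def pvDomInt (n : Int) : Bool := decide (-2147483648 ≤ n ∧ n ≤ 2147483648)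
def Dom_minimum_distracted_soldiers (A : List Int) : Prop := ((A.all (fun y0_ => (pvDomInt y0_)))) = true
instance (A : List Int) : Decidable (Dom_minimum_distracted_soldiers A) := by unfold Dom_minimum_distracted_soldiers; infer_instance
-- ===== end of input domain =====

-- B replaces A's forward resetting-counter scan by a reverse scan that counts the
-- elements after the last 1 (objective: more idiomatic/direct decomposition).

-- ===== PORT A =====
-- state = (distracted_soldiers, seen_soldiers), folded left over A as in the Python loop
def minimum_distracted_soldiers (A : List Int) : Int :=
  (A.foldl (fun st soldier =>
      if soldier = 1 then (0, st.2 + 1) else (st.1 + 1, st.2)) ((0 : Int), (0 : Int))).1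

-- ===== PORT B =====
-- reverse scan: count elements until the first 1 in the reversed list (= last 1 in A)
def pvAltGo (xs : List Int) : Int :=
  match xs with
  | [] => 0
  | x :: rest => if x = 1 then 0 else 1 + pvAltGo rest

def minimum_distracted_soldiers_alt (A : List Int) : Int :=
  pvAltGo A.reverse

-- ===== PRECONDITION & SPEC =====
def Spec_minimum_distracted_soldiers (A : List Int) (out : Int) : Prop := out = minimum_distracted_soldiers_alt A
instance (A : List Int) (out : Int) : Decidable (Spec_minimum_distracted_soldiers A out) := by unfold Spec_minimum_distracted_soldiers; infer_instance

-- ===== CLAIM (what is proved, stated in full; the proofs are below) =====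
def Claim_equal_minimum_distracted_soldiers : Prop := ∀ (A : List Int), Dom_minimum_distracted_soldiers A → Spec_minimum_distracted_soldiers A (minimum_distracted_soldiers A)

-- ===== LEMMAS AND PROOFS =====
theorem pvMain (A : List Int) :
    minimum_distracted_soldiers A = minimum_distracted_soldiers_alt A := by
  unfold minimum_distracted_soldiers minimum_distracted_soldiers_alt
  induction A using List.reverseRecOn with
  | nil => simp [pvAltGo]
  | append_singleton xs x ih =>
      rw [List.foldl_append, List.reverse_append]
      simp only [List.foldl_cons, List.foldl_nil, List.reverse_singleton,
        List.singleton_append, pvAltGo]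
      split_ifs with h
      · simp
      · simp [← ih]; ring

-- ===== VERDICT (by name: the statement is the Claim_ definition above) =====
theorem minimum_distracted_soldiers_spec : Claim_equal_minimum_distracted_soldiers := by
  intro A _
  unfold Spec_minimum_distracted_soldiers
  exact pvMain A
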